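-- pv_equiv track=rewrite | github.com/tomkoelman/nice_duration | src/nice_duration.py | _keep_specified_zeroes
-- ===== SOURCE A (Python) =====
-- def _keep_specified_zeroes(
--     values, leading_zeroes=False, trailing_zeroes=False, infix_zeroes=False
-- ):
--     """Given a values list, which is a list of pairs of units and amounts,
--     return a values list that has leading zeroes removed (if
--     requested), trailing zeroes removed (if requested) and infix
--     zeroes remove (if requested).
--     """
--
--     leading = []
--     trailing = []
--
--     # Find index for first pair where value is non-zero
--     first_non_zero_index = next((i for i, e in enumerate(values) if e[1]), 0)
--
--     # Find index for last pair where value is non-zero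
--     last_non_zero_index = len(values) - next(
--         (i for i, e in enumerate(reversed(values)) if e[1]), 0
--     )
--
--     if leading_zeroes:
--         # Put leading zeroes in `leading`
--         leading = values[:first_non_zero_index]
--
--     if trailing_zeroes:
--         # Put trailing zeroes in `trailing`
--         trailing = values[last_non_zero_index:]
--
--     # Infix is the bit in between the found indices
--     infix = values[first_non_zero_index:last_non_zero_index]
--
--     # Remove all zeroes from infix if we are not interested in them
--     if not infix_zeroes:
--         infix = [e for e in infix if e[1]]
--
--     return leading + infix + trailing
-- ===== SOURCE B (Python) =====
-- def _keep_specified_zeroes(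
--     values, leading_zeroes=False, trailing_zeroes=False, infix_zeroes=False
-- ):
--     """Single-pass re-implementation: compute the first/last non-zero
--     indices as A does, then classify each element in one loop instead
--     of building three slices and concatenating them."""
--     first_non_zero_index = next((i for i, e in enumerate(values) if e[1]), 0)
--     last_non_zero_index = len(values) - next(
--         (i for i, e in enumerate(reversed(values)) if e[1]), 0
--     )
--     result = []
--     for i, e in enumerate(values):
--         if e[1]:
--             result.append(e)
--         elif i < first_non_zero_index:
--             if leading_zeroes:
--                 result.append(e)
--         elif i >= last_non_zero_index:
--             if trailing_zeroes:
--                 result.append(e)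
--         else:
--             if infix_zeroes:
--                 result.append(e)
--     return result
-- ===== Notes on version B (the rewrite author's own statement) =====
-- stated objective: alternative
-- what changed: Replaces A's three slices plus a filter and list concatenation with a single classifying pass over enumerate(values) that appends each kept element to one result list.
import Mathlib
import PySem

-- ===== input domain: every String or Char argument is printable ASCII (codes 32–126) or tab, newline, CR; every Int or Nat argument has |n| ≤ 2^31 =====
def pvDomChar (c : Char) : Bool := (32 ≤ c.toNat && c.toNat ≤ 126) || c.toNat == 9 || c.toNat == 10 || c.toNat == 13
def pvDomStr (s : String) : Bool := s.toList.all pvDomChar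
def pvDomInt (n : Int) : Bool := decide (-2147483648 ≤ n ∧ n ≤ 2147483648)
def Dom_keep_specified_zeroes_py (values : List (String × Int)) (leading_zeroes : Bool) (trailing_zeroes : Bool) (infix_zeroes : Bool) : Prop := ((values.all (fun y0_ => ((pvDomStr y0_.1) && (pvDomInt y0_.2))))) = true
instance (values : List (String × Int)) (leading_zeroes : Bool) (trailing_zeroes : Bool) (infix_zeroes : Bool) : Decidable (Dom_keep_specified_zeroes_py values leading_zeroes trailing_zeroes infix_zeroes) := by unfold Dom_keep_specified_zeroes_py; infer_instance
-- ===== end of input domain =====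

-- B replaces A's three slices + filter + concatenation by a single classifying
-- pass over the enumerated list (objective: alternative decomposition).

-- ===== PORT A =====
-- `next((i for i, e in enumerate(xs) if e[1]), 0)`: first index (counted from k)
-- whose amount is non-zero, default 0 when none is found.
def fnzAux (k : Nat) : List (String × Int) → Nat
  | [] => 0
  | e :: rest => if e.2 ≠ 0 then k else fnzAux (k + 1) rest

-- Port of A. The Python slices values[:first], values[first:last], values[last:]
-- are exact as take/drop here because 0 ≤ first and 0 ≤ last ≤ len(values) always
-- hold for the two computed indices.
def keep_specified_zeroes_py (values : List (String × Int)) (leading_zeroes : Bool) (trailing_zeroes : Bool) (infix_zeroes : Bool) : List (String × Int) :=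
  let first_non_zero_index := fnzAux 0 values
  let last_non_zero_index := values.length - fnzAux 0 values.reverse
  let leading := if leading_zeroes then values.take first_non_zero_index else []
  let trailing := if trailing_zeroes then values.drop last_non_zero_index else []
  let infixPart := (values.drop first_non_zero_index).take (last_non_zero_index - first_non_zero_index)
  let infixPart := if infix_zeroes then infixPart else infixPart.filter (fun e => decide (e.2 ≠ 0))
  leading ++ infixPart ++ trailing

-- ===== PORT B =====
-- B's `for i, e in enumerate(values)` loop: classify each element and keep it or not.
def altLoop (first last : Nat) (lz tz iz : Bool) : Nat → List (String × Int) → List (String × Int)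
  | _, [] => []
  | i, e :: rest =>
    let keep := if e.2 ≠ 0 then true
                else if i < first then lz
                else if last ≤ i then tz
                else iz
    let tail := altLoop first last lz tz iz (i + 1) rest
    if keep then e :: tail else tail

def keep_specified_zeroes_py_alt (values : List (String × Int)) (leading_zeroes : Bool) (trailing_zeroes : Bool) (infix_zeroes : Bool) : List (String × Int) :=
  let first_non_zero_index := fnzAux 0 values
  let last_non_zero_index := values.length - fnzAux 0 values.reverse
  altLoop first_non_zero_index last_non_zero_index leading_zeroes trailing_zeroes infix_zeroes 0 values

-- ===== PRECONDITION & SPEC =====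
def Spec_keep_specified_zeroes_py (values : List (String × Int)) (leading_zeroes : Bool) (trailing_zeroes : Bool) (infix_zeroes : Bool) (out : List (String × Int)) : Prop := out = keep_specified_zeroes_py_alt values leading_zeroes trailing_zeroes infix_zeroes
instance (values : List (String × Int)) (leading_zeroes : Bool) (trailing_zeroes : Bool) (infix_zeroes : Bool) (out : List (String × Int)) : Decidable (Spec_keep_specified_zeroes_py values leading_zeroes trailing_zeroes infix_zeroes out) := by unfold Spec_keep_specified_zeroes_py; infer_instance

-- ===== CLAIM (what is proved, stated in full; the proofs are below) =====
def Claim_equal_keep_specified_zeroes_py : Prop := ∀ (values : List (String × Int)) (leading_zeroes : Bool) (trailing_zeroes : Bool) (infix_zeroes : Bool), Dom_keep_specified_zeroes_py values leading_zeroes trailing_zeroes infix_zeroes → Spec_keep_specified_zeroes_py values leading_zeroes trailing_zeroes infix_zeroes (keep_specified_zeroes_py values leading_zeroes trailing_zeroes infix_zeroes)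

-- ===== LEMMAS AND PROOFS =====

-- abbreviation for the non-zero test used throughout
def pnz (e : String × Int) : Bool := decide (e.2 ≠ 0)

lemma fnzAux_all_zero (xs : List (String × Int)) (k : Nat)
    (h : ∀ e ∈ xs, e.2 = 0) : fnzAux k xs = 0 := by
  induction xs generalizing k with
  | nil => rfl
  | cons e rest ih =>
      have he : e.2 = 0 := h e (by simp)
      simp [fnzAux, he]
      exact ih (k + 1) (fun x hx => h x (by simp [hx]))

lemma fnzAux_eq_findIdx (xs : List (String × Int)) (k : Nat)
    (h : ∃ e ∈ xs, e.2 ≠ 0) : fnzAux k xs = k + xs.findIdx pnz := by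
  induction xs generalizing k with
  | nil => simp at h
  | cons e rest ih =>
      by_cases he : e.2 ≠ 0
      · simp [fnzAux, he, List.findIdx_cons, pnz]
      · have hrest : ∃ x ∈ rest, x.2 ≠ 0 := by
          rcases h with ⟨x, hx, hx2⟩
          rcases List.mem_cons.mp hx with rfl | hx'
          · exact absurd hx2 he
          · exact ⟨x, hx', hx2⟩
        simp [fnzAux, he, List.findIdx_cons, pnz, ih (k + 1) hrest]
        omega

lemma mem_take_findIdx_zero (xs : List (String × Int)) (e : String × Int)
    (h : e ∈ xs.take (xs.findIdx pnz)) : e.2 = 0 := by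
  rcases List.mem_iff_getElem.mp h with ⟨i, hi, rfl⟩
  have hlen := hi
  simp only [List.length_take, lt_min_iff] at hlen
  obtain ⟨h1, h2⟩ := hlen
  have hnot : pnz (xs[i]'h2) = false := List.not_of_lt_findIdx h1
  rw [List.getElem_take]
  simpa [pnz] using hnot

lemma altLoop_leading (first last : Nat) (lz tz iz : Bool)
    (L rest : List (String × Int)) (i : Nat)
    (hz : ∀ e ∈ L, e.2 = 0) (hle : i + L.length ≤ first) :
    altLoop first last lz tz iz i (L ++ rest)
      = (if lz then L else []) ++ altLoop first last lz tz iz (i + L.length) rest := by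
  induction L generalizing i with
  | nil => simp
  | cons e L' ih =>
      have he : e.2 = 0 := hz e (by simp)
      have hi : i < first := by simp at hle; omega
      have hrec := ih (i + 1) (fun x hx => hz x (by simp [hx])) (by simp at hle ⊢; omega)
      rw [show i + 1 + L'.length = i + (e :: L').length from by simp; omega] at hrec
      simp only [List.cons_append, altLoop, he, hi]
      cases lz <;> simp [hrec]

lemma altLoop_infix (first last : Nat) (lz tz iz : Bool)
    (M rest : List (String × Int)) (i : Nat)
    (hge : first ≤ i) (hle : i + M.length ≤ last) :
    altLoop first last lz tz iz i (M ++ rest)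
      = (if iz then M else M.filter pnz) ++ altLoop first last lz tz iz (i + M.length) rest := by
  induction M generalizing i with
  | nil => simp
  | cons e M' ih =>
      have hi1 : ¬ i < first := by omega
      have hi2 : ¬ last ≤ i := by simp at hle; omega
      have hrec := ih (i + 1) (by omega) (by simp at hle ⊢; omega)
      rw [show i + 1 + M'.length = i + (e :: M').length from by simp; omega] at hrec
      by_cases he : e.2 ≠ 0
      · simp only [List.cons_append, altLoop, he, hi1, hi2]
        cases iz <;> simp [hrec, pnz, he]
      · simp only [List.cons_append, altLoop, he, hi1, hi2]
        cases iz <;> simp [hrec, pnz, he]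

lemma altLoop_trailing (first last : Nat) (lz tz iz : Bool)
    (T : List (String × Int)) (i : Nat) (hfl : first ≤ last)
    (hz : ∀ e ∈ T, e.2 = 0) (hge : last ≤ i) :
    altLoop first last lz tz iz i T = if tz then T else [] := by
  induction T generalizing i with
  | nil => simp [altLoop]
  | cons e T' ih =>
      have he : e.2 = 0 := hz e (by simp)
      have hi1 : ¬ i < first := by omega
      have hi2 : last ≤ i := hge
      have hrec := ih (i + 1) (fun x hx => hz x (by simp [hx])) (by omega)
      simp only [altLoop, he, hi1, hi2]
      cases tz <;> simp [hrec]

lemma combine (values : List (String × Int)) (lz tz iz : Bool) (f l : Nat)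
    (hfl : f ≤ l) (hln : l ≤ values.length)
    (hL : ∀ e ∈ values.take f, e.2 = 0) (hT : ∀ e ∈ values.drop l, e.2 = 0) :
    altLoop f l lz tz iz 0 values =
      (if lz then values.take f else []) ++
      (if iz then (values.drop f).take (l - f)
        else ((values.drop f).take (l - f)).filter pnz) ++
      (if tz then values.drop l else []) := by
  have hdropl : values.drop l = (values.drop f).drop (l - f) := by
    rw [List.drop_drop]; congr 1; omega
  have hdecomp : values = values.take f ++ ((values.drop f).take (l - f) ++ values.drop l) := by
    rw [hdropl, List.take_append_drop, List.take_append_drop]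
  have hLlen : (values.take f).length = f := by
    simp [List.length_take]; omega
  have hMlen : ((values.drop f).take (l - f)).length = l - f := by
    simp [List.length_take, List.length_drop]; omega
  conv_lhs => rw [hdecomp]
  rw [altLoop_leading f l lz tz iz _ _ 0 hL (by omega)]
  rw [show 0 + (values.take f).length = f from by omega]
  rw [altLoop_infix f l lz tz iz _ _ f (le_refl f) (by omega)]
  rw [hMlen, show f + (l - f) = l from by omega]
  rw [altLoop_trailing f l lz tz iz _ l hfl hT (le_refl l), List.append_assoc]

-- ===== VERDICT (by name: the statement is the Claim_ definition above) =====
theorem keep_specified_zeroes_py_spec : Claim_equal_keep_specified_zeroes_py := by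
  intro values lz tz iz _
  unfold Spec_keep_specified_zeroes_py keep_specified_zeroes_py keep_specified_zeroes_py_alt
  by_cases hz : ∀ e ∈ values, e.2 = 0
  · have hf : fnzAux 0 values = 0 := fnzAux_all_zero _ _ hz
    have hr : fnzAux 0 values.reverse = 0 :=
      fnzAux_all_zero _ _ (fun e he => hz e (List.mem_reverse.mp he))
    rw [hf, hr]
    have := combine values lz tz iz 0 (values.length - 0) (by omega) (by omega)
      (by simp) (by simp)
    rw [this]
    rfl
  · push Not at hz
    rcases hz with ⟨x, hx, hx2⟩
    have hex : ∃ e ∈ values, e.2 ≠ 0 := ⟨x, hx, hx2⟩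
    have hexr : ∃ e ∈ values.reverse, e.2 ≠ 0 := ⟨x, List.mem_reverse.mpr hx, hx2⟩
    have hf : fnzAux 0 values = values.findIdx pnz := by
      simpa using fnzAux_eq_findIdx values 0 hex
    have hr : fnzAux 0 values.reverse = values.reverse.findIdx pnz := by
      simpa using fnzAux_eq_findIdx values.reverse 0 hexr
    rw [hf, hr]
    have hf_lt : values.findIdx pnz < values.length :=
      List.findIdx_lt_length_of_exists ⟨x, hx, by simp [pnz, hx2]⟩
    have hr_lt : values.reverse.findIdx pnz < values.length := by
      have := List.findIdx_lt_length_of_exists (xs := values.reverse) (p := pnz)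
        ⟨x, List.mem_reverse.mpr hx, by simp [pnz, hx2]⟩
      simpa using this
    have hfl : values.findIdx pnz ≤ values.length - values.reverse.findIdx pnz := by
      -- the element at index (length - 1 - r) is non-zero, and findIdx is minimal
      have hidx : values.length - 1 - values.reverse.findIdx pnz < values.length := by omega
      have hget : values.reverse[values.reverse.findIdx pnz]'(by simpa using hr_lt)
          = values[values.length - 1 - values.reverse.findIdx pnz]'hidx := by
        rw [List.getElem_reverse]
      have hp : pnz (values[values.length - 1 - values.reverse.findIdx pnz]'hidx) = true := by
        rw [← hget]
        exact List.findIdx_getElem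
      by_contra hcon
      have hlt : values.length - 1 - values.reverse.findIdx pnz < values.findIdx pnz := by omega
      have hfalse : pnz (values[values.length - 1 - values.reverse.findIdx pnz]'hidx) = false :=
        List.not_of_lt_findIdx hlt
      rw [hp] at hfalse
      exact absurd hfalse (by simp)
    have hT : ∀ e ∈ values.drop (values.length - values.reverse.findIdx pnz), e.2 = 0 := by
      intro e he
      have htk : values.drop (values.length - values.reverse.findIdx pnz)
          = (values.reverse.take (values.reverse.findIdx pnz)).reverse := by
        rw [List.take_reverse, List.reverse_reverse]
      rw [htk] at he
      exact mem_take_findIdx_zero values.reverse e (List.mem_reverse.mp he)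
    rw [combine values lz tz iz _ _ hfl (by omega)
      (fun e he => mem_take_findIdx_zero values e he) hT]
    rfl
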